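-- pv_equiv track=rewrite | github.com/aguang5241/Interface-Maker | app.py | find_ijm
-- ===== SOURCE A (Python) =====
-- def find_ijm(N):
--     ijm_list = []
--     for i in range(1, N + 1):
--         if N % i == 0:
--             m = N // i
--             for j in range(m):
--                 ijm_list.append([i, j, m])
--     return ijm_list
-- ===== SOURCE B (Python) =====
-- def find_ijm(N):
--     if N <= 0:
--         return []
--     # integer sqrt of N by counting up (no imports needed)
--     r = 1
--     while (r + 1) * (r + 1) <= N:
--         r += 1
--     divs = set()
--     for d in range(1, r + 1):
--         if N % d == 0:
--             divs.add(d)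
--             divs.add(N // d)
--     out = []
--     for i in sorted(divs):
--         m = N // i
--         for j in range(m):
--             out.append([i, j, m])
--     return out
-- ===== Notes on version B (the rewrite author's own statement) =====
-- stated objective: alternative
-- what changed: B enumerates divisors only up to sqrt(N) (adding both d and N//d to a set, then sorting) instead of A's scan of every integer from 1 to N; total runtime is dominated by the sigma(N)-sized output in both, so this is an alternative algorithm, not a measured speedup.
import Mathlib
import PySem

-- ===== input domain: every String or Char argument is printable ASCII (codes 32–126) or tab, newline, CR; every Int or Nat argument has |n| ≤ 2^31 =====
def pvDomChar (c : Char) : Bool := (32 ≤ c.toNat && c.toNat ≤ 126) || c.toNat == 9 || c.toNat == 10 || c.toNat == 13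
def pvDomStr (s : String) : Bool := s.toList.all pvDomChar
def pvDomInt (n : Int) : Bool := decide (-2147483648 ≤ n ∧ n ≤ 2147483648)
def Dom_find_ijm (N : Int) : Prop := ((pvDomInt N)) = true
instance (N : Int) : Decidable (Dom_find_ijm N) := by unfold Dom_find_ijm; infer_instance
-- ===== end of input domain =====

-- B replaces A's scan of every integer 1..N by a sqrt(N) divisor enumeration
-- (add d and N//d to a set, sort it) — an alternative algorithm; the output itself
-- dominates the cost, so no speed is claimed.

-- ===== PORT A =====
def find_ijm (N : Int) : List (List Int) :=
  (PySem.List.pyRange 1 (N + 1) 1).foldl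
    (fun acc i =>
      if PySem.Int.mod N i = 0 then
        let m := PySem.Int.floordiv N i
        (PySem.List.pyRange 0 m 1).foldl (fun a j => a ++ [[i, j, m]]) acc
      else acc) []

-- ===== PORT B =====
-- while (r+1)*(r+1) <= N: r += 1   (fuel N.toNat bounds the iterations; guard only, same computation)
def pvIsqrtLoop : Nat → Int → Int → Int
  | 0, _, r => r
  | fuel + 1, N, r => if (r + 1) * (r + 1) ≤ N then pvIsqrtLoop fuel N (r + 1) else r

def pvDivSet (N r : Int) : PySem.Set Int :=
  (PySem.List.pyRange 1 (r + 1) 1).foldl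
    (fun s d =>
      if PySem.Int.mod N d = 0 then
        PySem.Set.add (PySem.Set.add s d) (PySem.Int.floordiv N d)
      else s) PySem.Set.empty

def find_ijm_alt (N : Int) : List (List Int) :=
  if N ≤ 0 then []
  else
    let r := pvIsqrtLoop N.toNat N 1
    let divs := pvDivSet N r
    (PySem.List.sorted divs (fun x => x) false).foldl
      (fun out i =>
        let m := PySem.Int.floordiv N i
        (PySem.List.pyRange 0 m 1).foldl (fun o j => o ++ [[i, j, m]]) out) []

-- ===== PRECONDITION & SPEC =====
def Spec_find_ijm (N : Int) (out : List (List Int)) : Prop := out = find_ijm_alt N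
instance (N : Int) (out : List (List Int)) : Decidable (Spec_find_ijm N out) := by unfold Spec_find_ijm; infer_instance

-- ===== CLAIM (what is proved, stated in full; the proofs are below) =====
def Claim_equal_find_ijm : Prop := ∀ (N : Int), Dom_find_ijm N → Spec_find_ijm N (find_ijm N)

-- ===== LEMMAS AND PROOFS =====

-- the per-divisor block of output rows
def pvBlock (N i : Int) : List (List Int) :=
  (PySem.List.pyRange 0 (PySem.Int.floordiv N i) 1).map (fun j => [i, j, PySem.Int.floordiv N i])

lemma pvInnerLoop (N i : Int) (acc : List (List Int)) :
    (PySem.List.pyRange 0 (PySem.Int.floordiv N i) 1).foldl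
      (fun a j => a ++ [[i, j, PySem.Int.floordiv N i]]) acc = acc ++ pvBlock N i := by
  simpa [pvBlock] using
    PySem.List.foldl_append_singleton_eq_map
      (l := PySem.List.pyRange 0 (PySem.Int.floordiv N i) 1)
      (f := fun j => [i, j, PySem.Int.floordiv N i]) (acc := acc)

lemma pvLoopA (N : Int) (L : List Int) (acc : List (List Int)) :
    L.foldl
      (fun acc i =>
        if PySem.Int.mod N i = 0 then
          (PySem.List.pyRange 0 (PySem.Int.floordiv N i) 1).foldl
            (fun a j => a ++ [[i, j, PySem.Int.floordiv N i]]) acc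
        else acc) acc
    = acc ++ (L.filter (fun i => PySem.Int.mod N i == 0)).flatMap (pvBlock N) := by
  induction L generalizing acc with
  | nil => simp
  | cons x xs ih =>
    by_cases h : PySem.Int.mod N x = 0
    · rw [List.foldl_cons, if_pos h, pvInnerLoop, ih]
      simp [h, List.append_assoc]
    · rw [List.foldl_cons, if_neg h, ih]
      simp [h]

lemma pvLoopB (N : Int) (L : List Int) (acc : List (List Int)) :
    L.foldl
      (fun out i =>
        (PySem.List.pyRange 0 (PySem.Int.floordiv N i) 1).foldl
          (fun o j => o ++ [[i, j, PySem.Int.floordiv N i]]) out) acc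
    = acc ++ L.flatMap (pvBlock N) := by
  induction L generalizing acc with
  | nil => simp
  | cons x xs ih =>
    rw [List.foldl_cons, pvInnerLoop, ih]
    simp [List.append_assoc]

lemma pvIsqrtLoop_spec (fuel : Nat) (N r : Int) (h1 : 1 ≤ r) (h2 : r * r ≤ N)
    (h3 : N ≤ (fuel : Int) + r) :
    1 ≤ pvIsqrtLoop fuel N r ∧
      pvIsqrtLoop fuel N r * pvIsqrtLoop fuel N r ≤ N ∧
      N < (pvIsqrtLoop fuel N r + 1) * (pvIsqrtLoop fuel N r + 1) := by
  induction fuel generalizing r with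
  | zero =>
    simp only [pvIsqrtLoop]
    refine ⟨h1, h2, ?_⟩
    simp only [Nat.cast_zero, zero_add] at h3
    nlinarith
  | succ n ih =>
    simp only [pvIsqrtLoop]
    split_ifs with h
    · exact ih (r + 1) (by omega) h (by push_cast at h3 ⊢; omega)
    · exact ⟨h1, h2, by omega⟩

lemma pvDivSet_nodup (N r : Int) : (pvDivSet N r).Nodup := by
  unfold pvDivSet
  generalize PySem.List.pyRange 1 (r + 1) 1 = L
  have : ∀ (s : PySem.Set Int), s.Nodup →
      (L.foldl (fun s d =>
        if PySem.Int.mod N d = 0 then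
          PySem.Set.add (PySem.Set.add s d) (PySem.Int.floordiv N d)
        else s) s).Nodup := by
    induction L with
    | nil => intro s hs; simpa using hs
    | cons x xs ih =>
      intro s hs
      simp only [List.foldl_cons]
      split_ifs with h
      · exact ih _ (PySem.Set.nodup_add _ _ (PySem.Set.nodup_add _ _ hs))
      · exact ih _ hs
  exact this _ (by simp [PySem.Set.empty])

lemma pvDivSet_mem (N r x : Int) :
    x ∈ pvDivSet N r ↔
      ∃ d, (1 ≤ d ∧ d < r + 1) ∧ PySem.Int.mod N d = 0 ∧
        (x = d ∨ x = PySem.Int.floordiv N d) := by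
  unfold pvDivSet
  have key : ∀ (L : List Int) (s : PySem.Set Int),
      x ∈ L.foldl (fun s d =>
        if PySem.Int.mod N d = 0 then
          PySem.Set.add (PySem.Set.add s d) (PySem.Int.floordiv N d)
        else s) s
      ↔ x ∈ s ∨ ∃ d ∈ L, PySem.Int.mod N d = 0 ∧ (x = d ∨ x = PySem.Int.floordiv N d) := by
    intro L
    induction L with
    | nil => simp
    | cons y ys ih =>
      intro s
      simp only [List.foldl_cons, List.mem_cons]
      split_ifs with h
      · rw [ih]
        simp only [PySem.Set.mem_add]
        constructor
        · rintro ((⟨hs | hx⟩ | hx) | ⟨d, hd, hmd, hxd⟩)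
          · exact Or.inl hs
          · exact Or.inr ⟨y, Or.inl rfl, h, Or.inl hx⟩
          · exact Or.inr ⟨y, Or.inl rfl, h, Or.inr hx⟩
          · exact Or.inr ⟨d, Or.inr hd, hmd, hxd⟩
        · rintro (hs | ⟨d, (rfl | hd), hmd, hxd⟩)
          · exact Or.inl (Or.inl (Or.inl hs))
          · rcases hxd with rfl | rfl
            · exact Or.inl (Or.inl (Or.inr rfl))
            · exact Or.inl (Or.inr rfl)
          · exact Or.inr ⟨d, hd, hmd, hxd⟩
      · rw [ih]
        constructor
        · rintro (hs | ⟨d, hd, hmd, hxd⟩)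
          · exact Or.inl hs
          · exact Or.inr ⟨d, Or.inr hd, hmd, hxd⟩
        · rintro (hs | ⟨d, (rfl | hd), hmd, hxd⟩)
          · exact Or.inl hs
          · exact absurd hmd h
          · exact Or.inr ⟨d, hd, hmd, hxd⟩
  rw [key]
  simp only [PySem.Set.empty, List.not_mem_nil, false_or]
  constructor
  · rintro ⟨d, hd, hmd, hxd⟩
    exact ⟨d, (PySem.List.mem_pyRange_one).1 hd, hmd, hxd⟩
  · rintro ⟨d, hd, hmd, hxd⟩
    exact ⟨d, (PySem.List.mem_pyRange_one).2 hd, hmd, hxd⟩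

-- a divisor of N lies below the sqrt bound, or its cofactor does
lemma pvDivChar (N r x : Int) (hN : 1 ≤ N) (hr1 : 1 ≤ r) (hr2 : r * r ≤ N)
    (hr3 : N < (r + 1) * (r + 1)) :
    (∃ d, (1 ≤ d ∧ d < r + 1) ∧ PySem.Int.mod N d = 0 ∧
        (x = d ∨ x = PySem.Int.floordiv N d))
    ↔ ((1 ≤ x ∧ x < N + 1) ∧ PySem.Int.mod N x = 0) := by
  constructor
  · rintro ⟨d, ⟨hd1, hd2⟩, hmd, hxd⟩
    have hdvd : d ∣ N := (PySem.Int.mod_eq_zero_iff_dvd N d).1 hmd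
    obtain ⟨k, hk⟩ := hdvd
    have hk1 : 1 ≤ k := by nlinarith
    rcases hxd with rfl | rfl
    · refine ⟨⟨hd1, by nlinarith⟩, hmd⟩
    · have hq : PySem.Int.floordiv N d = k := by
        rw [PySem.Int.floordiv_eq_ediv_of_pos (by omega), hk,
          Int.mul_ediv_cancel_left _ (by omega : d ≠ 0)]
      rw [hq]
      refine ⟨⟨hk1, by nlinarith⟩, ?_⟩
      exact (PySem.Int.mod_eq_zero_iff_dvd N k).2 ⟨d, by rw [hk, mul_comm]⟩
  · rintro ⟨⟨hx1, hx2⟩, hmx⟩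
    have hdvd : x ∣ N := (PySem.Int.mod_eq_zero_iff_dvd N x).1 hmx
    obtain ⟨k, hk⟩ := hdvd
    have hk1 : 1 ≤ k := by nlinarith
    by_cases hxr : x < r + 1
    · exact ⟨x, ⟨hx1, hxr⟩, hmx, Or.inl rfl⟩
    · have hkr : k < r + 1 := by nlinarith
      have hq : PySem.Int.floordiv N k = x := by
        rw [PySem.Int.floordiv_eq_ediv_of_pos (by omega), hk,
          Int.mul_ediv_cancel _ (by omega : k ≠ 0)]
      exact ⟨k, ⟨hk1, hkr⟩, (PySem.Int.mod_eq_zero_iff_dvd N k).2 ⟨x, by rw [hk, mul_comm]⟩, Or.inr hq.symm⟩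

lemma pvSorted_eq_filter (N : Int) (hN : 1 ≤ N) :
    PySem.List.sorted (pvDivSet N (pvIsqrtLoop N.toNat N 1)) (fun x => x) false
      = (PySem.List.pyRange 1 (N + 1) 1).filter (fun i => PySem.Int.mod N i == 0) := by
  set r := pvIsqrtLoop N.toNat N 1 with hr
  obtain ⟨hr1, hr2, hr3⟩ :=
    pvIsqrtLoop_spec N.toNat N 1 le_rfl (by nlinarith) (by omega)
  apply PySem.List.sorted_eq_of_perm_of_pairwise_lt
  · apply (List.perm_ext_iff_of_nodup ?_ (pvDivSet_nodup N r)).2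
    · intro x
      rw [pvDivSet_mem, pvDivChar N r x hN hr1 hr2 hr3]
      simp [PySem.List.mem_pyRange_one]
    · exact (PySem.List.nodup_pyRange_one 1 (N + 1)).filter _
  · exact (PySem.List.pairwise_lt_pyRange_one 1 (N + 1)).filter _

-- ===== VERDICT (by name: the statement is the Claim_ definition above) =====
theorem find_ijm_spec : Claim_equal_find_ijm := by
  intro N _
  show find_ijm N = find_ijm_alt N
  by_cases hN : N ≤ 0
  · have : PySem.List.pyRange 1 (N + 1) 1 = [] :=
      PySem.List.pyRange_one_eq_nil (by omega)
    simp [find_ijm, find_ijm_alt, hN, this]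
  · unfold find_ijm find_ijm_alt
    rw [if_neg hN]
    simp only [pvLoopA, pvLoopB, List.nil_append]
    rw [pvSorted_eq_filter N (by omega)]
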